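-- pv_equiv track=rewrite | github.com/MrBrantCode/unitest_baseline | mut_generate/mist_train_cf/cf_24928/solution.py | can_be_palindrome
-- ===== SOURCE A (Python) =====
-- def can_be_palindrome(s: str) -> bool:
--     """
--     This function determines if a given string can be converted into a palindrome
--     by rearranging its characters, ignoring case sensitivity and non-alphanumeric
--     characters.
--
--     Args:
--         s (str): The input string.
--
--     Returns:
--         bool: True if the string can be converted into a palindrome, False otherwise.
--     """
--
--     # Convert the string to lowercase and remove non-alphanumeric characters
--     s = ''.join(e for e in s if e.isalnum()).lower()
--
--     # Create a frequency dictionary for characters in the string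
--     freq_dict = {}
--     for char in s:
--         if char in freq_dict:
--             freq_dict[char] += 1
--         else:
--             freq_dict[char] = 1
--
--     # Count the number of characters that appear an odd number of times
--     odd_count = 0
--     for count in freq_dict.values():
--         if count % 2 != 0:
--             odd_count += 1
--
--     # A string can be rearranged into a palindrome if at most one character appears
--     # an odd number of times
--     return odd_count <= 1
-- ===== SOURCE B (Python) =====
-- def can_be_palindrome(s: str) -> bool:
--     # Same filtering as the original, then a single parity pass over a set.
--     s = ''.join(e for e in s if e.isalnum()).lower()
--     odd = set()
--     for char in s:
--         if char in odd:
--             odd.discard(char)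
--         else:
--             odd.add(char)
--     return len(odd) <= 1
-- ===== Notes on version B (the rewrite author's own statement) =====
-- stated objective: simpler
-- what changed: Replaces the frequency dictionary plus a second odd-counting pass over its values with a single pass that tracks character parity directly in a set and tests its size.
import Mathlib
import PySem

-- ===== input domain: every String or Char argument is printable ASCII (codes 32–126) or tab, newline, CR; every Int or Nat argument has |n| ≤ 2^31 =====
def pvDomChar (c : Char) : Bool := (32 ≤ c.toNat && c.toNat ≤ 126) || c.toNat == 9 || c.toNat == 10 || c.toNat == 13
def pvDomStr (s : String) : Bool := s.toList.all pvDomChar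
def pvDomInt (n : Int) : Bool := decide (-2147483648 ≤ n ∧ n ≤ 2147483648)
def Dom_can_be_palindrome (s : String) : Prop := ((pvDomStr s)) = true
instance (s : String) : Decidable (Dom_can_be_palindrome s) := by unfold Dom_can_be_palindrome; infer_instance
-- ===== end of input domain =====

-- B replaces A's frequency dictionary and second odd-counting pass with one pass
-- tracking character parity in a set (objective: simpler; same cost).


-- ===== PORT A =====
def can_be_palindrome (s : String) : Bool :=
  -- s = ''.join(e for e in s if e.isalnum()).lower()
  let t := PySem.Str.lower (String.mk (s.toList.filter (fun e => PySem.Str.isalnum e)))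
  -- frequency dictionary loop
  let freq_dict := t.toList.foldl
    (fun d char =>
      if d.contains char then d.insert char (d.getD char 0 + 1)
      else d.insert char (1 : Int))
    PySem.Dict.empty
  -- odd-count loop over the values
  let odd_count := (PySem.Dict.values freq_dict).foldl
    (fun acc count => if PySem.Int.mod count 2 ≠ 0 then acc + 1 else acc) (0 : Int)
  decide (odd_count ≤ 1)

-- ===== PORT B =====
def can_be_palindrome_alt (s : String) : Bool :=
  let t := PySem.Str.lower (String.mk (s.toList.filter (fun e => PySem.Str.isalnum e)))
  -- single parity pass over a set
  let odd := t.toList.foldl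
    (fun odd char =>
      if PySem.Set.contains odd char then PySem.Set.discard odd char
      else PySem.Set.add odd char)
    (PySem.Set.empty : PySem.Set Char)
  decide (PySem.Set.len odd ≤ 1)

-- ===== PRECONDITION & SPEC =====
def Spec_can_be_palindrome (s : String) (out : Bool) : Prop := out = can_be_palindrome_alt s
instance (s : String) (out : Bool) : Decidable (Spec_can_be_palindrome s out) := by unfold Spec_can_be_palindrome; infer_instance

-- ===== CLAIM (what is proved, stated in full; the proofs are below) =====
def Claim_equal_can_be_palindrome : Prop := ∀ (s : String), Dom_can_be_palindrome s → Spec_can_be_palindrome s (can_be_palindrome s)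

-- ===== LEMMAS AND PROOFS =====

-- A's dict loop is the counter loop: the contains-branch is immaterial.
theorem freq_loop_eq_counter (l : List Char) :
    l.foldl (fun d char =>
      if d.contains char then d.insert char (d.getD char 0 + 1)
      else d.insert char (1 : Int)) PySem.Dict.empty = PySem.Dict.counter l := by
  rw [← PySem.Dict.foldl_insert_getD_add_one_eq_counter]
  apply PySem.List.foldl_congr_mem
  intro d c _
  by_cases h : d.contains c = true
  · simp [h]
  · simp only [Bool.not_eq_true] at h
    have hnone : d.get? c = none := by
      rcases hh : d.get? c with _ | v
      · rfl
      · have hct : d.contains c = true := by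
          rw [PySem.Dict.contains_eq_isSome_get?, hh]; rfl
        rw [h] at hct; exact Bool.noConfusion hct
    simp [h, PySem.Dict.getD, hnone]

-- counting with an if-accumulator is the length of the filter
theorem foldl_count_if {α : Type} (p : α → Prop) [DecidablePred p] (l : List α) (a : Int) :
    l.foldl (fun acc v => if p v then acc + 1 else acc) a
      = a + (l.filter (fun v => decide (p v))).length := by
  induction l generalizing a with
  | nil => simp
  | cons x xs ih =>
    by_cases h : p x
    · simp [List.foldl_cons, h, ih]; ring
    · simp [List.foldl_cons, h, ih]

-- B's parity set: nodup, and membership is exactly "odd count in l"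
theorem parity_set_inv (l : List Char) :
    (l.foldl (fun odd char =>
        if PySem.Set.contains odd char then PySem.Set.discard odd char
        else PySem.Set.add odd char) (PySem.Set.empty : PySem.Set Char)).Nodup ∧
    ∀ a, a ∈ (l.foldl (fun odd char =>
        if PySem.Set.contains odd char then PySem.Set.discard odd char
        else PySem.Set.add odd char) (PySem.Set.empty : PySem.Set Char)) ↔ (l.count a) % 2 = 1 := by
  induction l using List.reverseRecOn with
  | nil => simp [PySem.Set.empty]
  | append_singleton xs c ih =>
    obtain ⟨hnd, hmem⟩ := ih
    rw [List.foldl_append]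
    simp only [List.foldl_cons, List.foldl_nil]
    by_cases h : c ∈ (xs.foldl (fun odd char =>
        if PySem.Set.contains odd char then PySem.Set.discard odd char
        else PySem.Set.add odd char) (PySem.Set.empty : PySem.Set Char))
    · have hc : PySem.Set.contains (xs.foldl (fun odd char =>
          if PySem.Set.contains odd char then PySem.Set.discard odd char
          else PySem.Set.add odd char) (PySem.Set.empty : PySem.Set Char)) c = true :=
        (PySem.Set.contains_iff _ _).mpr h
      rw [if_pos hc]
      have hocc : (xs.count c) % 2 = 1 := (hmem c).mp h
      refine ⟨PySem.Set.nodup_discard _ _ hnd, fun a => ?_⟩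
      rw [PySem.Set.mem_discard, List.count_append]
      by_cases hac : a = c
      · subst hac
        simp only [List.count_singleton, beq_self_eq_true, if_true]
        constructor
        · rintro ⟨-, hh⟩; exact absurd rfl hh
        · intro hh; omega
      · have : List.count a [c] = 0 := by
          rw [List.count_eq_zero]; simp [hac]
        rw [this, hmem a]
        constructor
        · rintro ⟨hh, -⟩; omega
        · intro hh; exact ⟨by omega, hac⟩
    · have hc : PySem.Set.contains (xs.foldl (fun odd char =>
          if PySem.Set.contains odd char then PySem.Set.discard odd char
          else PySem.Set.add odd char) (PySem.Set.empty : PySem.Set Char)) c = false := by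
        exact Bool.eq_false_iff.mpr (fun hh => h ((PySem.Set.contains_iff _ _).mp hh))
      rw [if_neg (by rw [hc]; simp)]
      have hocc : ¬ (xs.count c) % 2 = 1 := fun hh => h ((hmem c).mpr hh)
      refine ⟨PySem.Set.nodup_add _ _ hnd, fun a => ?_⟩
      rw [PySem.Set.mem_add, List.count_append]
      by_cases hac : a = c
      · subst hac
        simp only [List.count_singleton, beq_self_eq_true, if_true]
        constructor
        · intro _; omega
        · intro _; exact Or.inr trivial
      · have : List.count a [c] = 0 := by
          rw [List.count_eq_zero]; simp [hac]
        rw [this, hmem a]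
        constructor
        · rintro (hh | hh)
          · omega
          · exact absurd hh hac
        · intro hh; exact Or.inl (by omega)

-- the core fact, over the common filtered-and-lowered character list
theorem core_eq (l : List Char) :
    (decide ((PySem.Dict.values (l.foldl (fun d char =>
        if d.contains char then d.insert char (d.getD char 0 + 1)
        else d.insert char (1 : Int)) PySem.Dict.empty)).foldl
      (fun acc count => if PySem.Int.mod count 2 ≠ 0 then acc + 1 else acc) (0 : Int) ≤ 1))
    = decide (PySem.Set.len (l.foldl (fun odd char =>
        if PySem.Set.contains odd char then PySem.Set.discard odd char
        else PySem.Set.add odd char) (PySem.Set.empty : PySem.Set Char)) ≤ 1) := by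
  rw [freq_loop_eq_counter]
  have hvals : PySem.Dict.values (PySem.Dict.counter l)
      = (PySem.Set.ofList l).map (fun k => ((l.count k : Int))) := by
    simp only [PySem.Dict.values, PySem.Dict.items_counter, List.map_map]
    rfl
  rw [hvals, foldl_count_if]
  obtain ⟨hnd, hmem⟩ := parity_set_inv l
  -- A's odd count = length of the odd-count keys; B's set is a permutation of them
  have hperm : ((PySem.Set.ofList l).filter (fun k => decide (l.count k % 2 = 1))).Perm
      (l.foldl (fun odd char =>
        if PySem.Set.contains odd char then PySem.Set.discard odd char
        else PySem.Set.add odd char) (PySem.Set.empty : PySem.Set Char)) := by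
    rw [List.perm_ext_iff_of_nodup ((PySem.Set.nodup_ofList l).filter _) hnd]
    intro a
    simp only [List.mem_filter, PySem.Set.mem_ofList, decide_eq_true_eq, hmem a]
    constructor
    · exact fun h => h.2
    · intro h
      exact ⟨List.count_pos_iff.mp (by omega), h⟩
  have hlenfilter : ((PySem.Set.ofList l).map (fun k => ((l.count k : Int)))).filter
        (fun count => decide (PySem.Int.mod count 2 ≠ 0))
      = ((PySem.Set.ofList l).filter (fun k => decide (l.count k % 2 = 1))).map
        (fun k => ((l.count k : Int))) := by
    rw [List.filter_map]
    congr 1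
    apply List.filter_congr
    intro k _
    simp only [Function.comp, PySem.Int.mod, decide_eq_decide, Int.fmod_eq_emod]
    omega
  rw [hlenfilter, List.length_map, hperm.length_eq]
  simp [PySem.Set.len]

-- ===== VERDICT (by name: the statement is the Claim_ definition above) =====
theorem can_be_palindrome_spec : Claim_equal_can_be_palindrome := by
  intro s _
  unfold Spec_can_be_palindrome can_be_palindrome can_be_palindrome_alt
  exact core_eq _
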